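-- pv_equiv track=rewrite | github.com/OSEUK/Algorithm_Python | 알고리즘 기초 2/브루트 포스/브루트 포스/3085.py | count_max_candies_in_board
-- ===== SOURCE A (Python) =====
-- def count_max_candies_in_board(board):
--     n = len(board)
--     max_candies = 0
--
--     # 가로로 연속한 사탕 수 계산
--     for i in range(n):
--         count = 1
--         for j in range(1, n):
--             if board[i][j] == board[i][j - 1]:
--                 count += 1
--             else:
--                 max_candies = max(max_candies, count)
--                 count = 1
--         max_candies = max(max_candies, count)
--
--     # 세로로 연속한 사탕 수 계산
--     for j in range(n):
--         count = 1
--         for i in range(1, n):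
--             if board[i][j] == board[i - 1][j]:
--                 count += 1
--             else:
--                 max_candies = max(max_candies, count)
--                 count = 1
--         max_candies = max(max_candies, count)
--
--     return max_candies
-- ===== SOURCE B (Python) =====
-- def max_run(line):
--     # change points: indices j where line[j] differs from line[j-1]
--     breaks = [j for j, (a, b) in enumerate(zip(line, line[1:]), 1) if a != b]
--     edges = [0] + breaks + [len(line)]
--     # longest run = widest gap between consecutive boundaries
--     return max(b - a for a, b in zip(edges, edges[1:]))
--
--
-- def count_max_candies_in_board(board):
--     n = len(board)
--     lines = [[board[i][j] for j in range(n)] for i in range(n)]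
--     lines += [[board[i][j] for i in range(n)] for j in range(n)]
--     return max((max_run(line) for line in lines), default=0)
-- ===== Notes on version B (the rewrite author's own statement) =====
-- stated objective: alternative
-- what changed: A keeps a running count and running maximum inside two nested index loops; B extracts the rows and columns as explicit lines, and for each line computes the change-point indices (where adjacent elements differ), pads them with 0 and n, and returns the widest gap between consecutive boundaries - no run counter or running maximum anywhere.
-- outside the precondition, e.g. on count_max_candies_in_board([[]]): A returns 1, B raises IndexError
import Mathlib
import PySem

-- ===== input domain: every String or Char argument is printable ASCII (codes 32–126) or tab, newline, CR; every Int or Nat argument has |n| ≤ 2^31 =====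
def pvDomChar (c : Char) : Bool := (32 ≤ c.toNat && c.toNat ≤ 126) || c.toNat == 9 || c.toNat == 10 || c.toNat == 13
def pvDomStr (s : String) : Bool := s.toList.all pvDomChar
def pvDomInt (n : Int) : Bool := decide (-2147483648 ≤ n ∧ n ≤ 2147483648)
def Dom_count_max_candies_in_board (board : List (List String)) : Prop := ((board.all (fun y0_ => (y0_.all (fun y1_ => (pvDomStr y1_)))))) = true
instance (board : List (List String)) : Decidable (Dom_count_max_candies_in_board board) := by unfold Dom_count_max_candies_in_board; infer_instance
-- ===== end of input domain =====

-- B replaces A's nested index loops with their running count and running maximum by a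
-- change-point formulation: extract the rows and columns as explicit lines, and for each line
-- take the widest gap between consecutive boundaries 0, change indices, n (objective: alternative).

-- ===== PORT A =====
def count_max_candies_in_board (board : List (List String)) : Int :=
  let n : Int := PySem.List.len board
  let max_candies : Int := 0
  -- 가로 (rows)
  let max_candies : Int :=
    (PySem.List.pyRange 0 n 1).foldl (fun mc i =>
      let s := (PySem.List.pyRange 1 n 1).foldl
        (fun (s : Int × Int) j =>
          if PySem.List.pyGetD (PySem.List.pyGetD board i []) j "" ==
             PySem.List.pyGetD (PySem.List.pyGetD board i []) (j - 1) ""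
          then (s.1, s.2 + 1) else (max s.1 s.2, 1)) (mc, 1)
      max s.1 s.2) max_candies
  -- 세로 (columns)
  let max_candies : Int :=
    (PySem.List.pyRange 0 n 1).foldl (fun mc j =>
      let s := (PySem.List.pyRange 1 n 1).foldl
        (fun (s : Int × Int) i =>
          if PySem.List.pyGetD (PySem.List.pyGetD board i []) j "" ==
             PySem.List.pyGetD (PySem.List.pyGetD board (i - 1) []) j ""
          then (s.1, s.2 + 1) else (max s.1 s.2, 1)) (mc, 1)
      max s.1 s.2) max_candies
  max_candies

-- ===== PORT B =====
-- zip(line, line[1:]) → line.zip line.tail (exact for lists: [1:] = drop 1 = tail);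
-- enumerate(…, 1) → List.zipIdx 1 (yields (pair, index)).
-- Python's max(gen) raises on an empty generator; here the edges list always has ≥ 2 elements,
-- so the gap list is never empty and the .getD 0 default is unreachable.
def max_run (line : List String) : Int :=
  let breaks : List Int :=
    (((line.zip line.tail).zipIdx 1).filter (fun p => !(p.1.1 == p.1.2))).map
      (fun p => (p.2 : Int))
  let edges : List Int := (0 : Int) :: breaks ++ [(line.length : Int)]
  (PySem.List.max? ((edges.zip edges.tail).map (fun p => p.2 - p.1)) (fun y => y)).getD 0

def count_max_candies_in_board_alt (board : List (List String)) : Int :=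
  let n : Int := PySem.List.len board
  let lines := (PySem.List.pyRange 0 n 1).map (fun i =>
    (PySem.List.pyRange 0 n 1).map (fun j =>
      PySem.List.pyGetD (PySem.List.pyGetD board i []) j ""))
  let lines := lines ++ (PySem.List.pyRange 0 n 1).map (fun j =>
    (PySem.List.pyRange 0 n 1).map (fun i =>
      PySem.List.pyGetD (PySem.List.pyGetD board i []) j ""))
  PySem.List.maxD (lines.map max_run) (fun y => y) 0

-- ===== PRECONDITION & SPEC =====
-- Pre_ excludes ragged boards with a row shorter than the board is high: there Python A raises
-- IndexError on board[i][j], except the single-row-empty board [[]] where A's inner loops are empty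
-- so it returns 1 without ever indexing, while B's element-wise comprehension raises IndexError.
def Pre_count_max_candies_in_board (board : List (List String)) : Prop :=
  ∀ row ∈ board, board.length ≤ row.length
instance (board : List (List String)) : Decidable (Pre_count_max_candies_in_board board) := by
  unfold Pre_count_max_candies_in_board; infer_instance

def pvWitness_count_max_candies_in_board : List (List String) := [["C", "P"], ["P", "P"]]

def Spec_count_max_candies_in_board (board : List (List String)) (out : Int) : Prop := out = count_max_candies_in_board_alt board
instance (board : List (List String)) (out : Int) : Decidable (Spec_count_max_candies_in_board board out) := by unfold Spec_count_max_candies_in_board; infer_instance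

-- ===== CLAIM (what is proved, stated in full; the proofs are below) =====
def Claim_equal_count_max_candies_in_board : Prop := ∀ (board : List (List String)), Dom_count_max_candies_in_board board → Pre_count_max_candies_in_board board → Spec_count_max_candies_in_board board (count_max_candies_in_board board)

-- ===== LEMMAS AND PROOFS =====

-- Run-length encoding of a line (proof-only reference object): current run c, last element p.
def rlGo (c : Int) (p : String) : List String → List Int
  | [] => [c]
  | x :: xs => if x == p then rlGo (c + 1) x xs else c :: rlGo 1 x xs

-- Structural form of A's inner loop: running max mc, current run c ending at p.
def scanMax (mc c : Int) (p : String) : List String → Int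
  | [] => max mc c
  | x :: xs => if x == p then scanMax mc (c + 1) x xs else scanMax (max mc c) 1 x xs

-- Change points of a line: indices j0, j0+1, … where the element differs from its predecessor p.
def changesFrom (j0 : Int) (p : String) : List String → List Int
  | [] => []
  | y :: t => if y == p then changesFrom (j0 + 1) y t else j0 :: changesFrom (j0 + 1) y t

-- Successive differences of a list of boundaries.
def gapsOf : List Int → List Int
  | [] => []
  | [_] => []
  | a :: b :: t => (b - a) :: gapsOf (b :: t)

lemma rlGo_ne_nil (c : Int) (p : String) (xs : List String) : rlGo c p xs ≠ [] := by
  induction xs generalizing c p with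
  | nil => simp [rlGo]
  | cons x xs ih => by_cases h : (x == p) = true <;> simp [rlGo, h, ih]

lemma gapsOf_cons2 (s j0 : Int) (r : List Int) :
    gapsOf (s :: j0 :: r) = (j0 - s) :: gapsOf (j0 :: r) := by
  cases r <;> rfl

lemma zip_changes (xs : List String) :
    ∀ (x : String) (k : Nat),
      ((((x :: xs).zip xs).zipIdx k).filter (fun p => !(p.1.1 == p.1.2))).map
        (fun p => (p.2 : Int)) = changesFrom (k : Int) x xs := by
  induction xs with
  | nil => intro x k; simp [changesFrom]
  | cons y t ih =>
    intro x k
    have hcast : ((k + 1 : Nat) : Int) = (k : Int) + 1 := by push_cast; ring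
    simp only [List.zip_cons_cons, List.zipIdx_cons, List.filter_cons]
    by_cases h : (x == y) = true
    · have hxy : x = y := eq_of_beq h
      subst hxy
      rw [if_neg (by simp)]
      rw [ih x (k + 1), hcast]
      simp [changesFrom]
    · have hy : (y == x) = false := by
        cases e : (y == x) with
        | false => rfl
        | true => exact absurd (by rw [eq_of_beq e]; exact beq_self_eq_true x) h
      rw [if_pos (by simp [h])]
      simp only [List.map_cons]
      rw [ih y (k + 1), hcast]
      simp [changesFrom, hy]

lemma gaps_rl (ys : List String) :
    ∀ (j0 s : Int) (p : String),
      gapsOf (s :: changesFrom j0 p ys ++ [j0 + (ys.length : Int)]) = rlGo (j0 - s) p ys := by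
  induction ys with
  | nil => intro j0 s p; simp [changesFrom, gapsOf, rlGo]
  | cons y t ih =>
    intro j0 s p
    have hlen : j0 + ((y :: t).length : Int) = (j0 + 1) + (t.length : Int) := by
      simp only [List.length_cons]; push_cast; ring
    rw [hlen]
    by_cases h : (y == p) = true
    · simp only [changesFrom, h, if_true, rlGo]
      have := ih (j0 + 1) s y
      rw [show j0 + 1 - s = j0 - s + 1 by ring] at this
      exact this
    · simp only [changesFrom, h, Bool.false_eq_true, if_false, rlGo, List.cons_append]
      rw [gapsOf_cons2]
      have := ih (j0 + 1) j0 y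
      rw [show j0 + 1 - j0 = (1 : Int) by ring] at this
      rw [← List.cons_append, this]

lemma zip_gaps (edges : List Int) :
    (edges.zip edges.tail).map (fun p => p.2 - p.1) = gapsOf edges := by
  induction edges with
  | nil => simp [gapsOf]
  | cons a t ih =>
    cases t with
    | nil => simp [gapsOf]
    | cons b u => simp only [List.tail_cons, List.zip_cons_cons, List.map_cons, gapsOf]
                  rw [← ih]; simp

-- max_run computes the maximum of the run-length encoding.
lemma max_run_eq_rl (x : String) (xs : List String) :
    max_run (x :: xs) = (PySem.List.max? (rlGo 1 x xs) (fun y => y)).getD 0 := by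
  unfold max_run
  simp only [List.tail_cons]
  rw [zip_changes xs x 1, zip_gaps, Nat.cast_one]
  rw [show (((x :: xs).length : Nat) : Int) = 1 + (xs.length : Int) by simp only [List.length_cons]; push_cast; ring]
  rw [gaps_rl xs 1 0 x, show (1 : Int) - 0 = 1 by ring]

lemma foldl_max_pull (t : List Int) : ∀ (a c : Int), t.foldl max (max c a) = max c (t.foldl max a) := by
  induction t with
  | nil => intro a c; rfl
  | cons b t ih =>
    intro a c
    simp only [List.foldl_cons]
    rw [max_assoc]
    exact ih (max a b) c

lemma maxgd_cons (c : Int) (l : List Int) (h : l ≠ []) :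
    (PySem.List.max? (c :: l) (fun y => y)).getD 0
      = max c ((PySem.List.max? l (fun y => y)).getD 0) := by
  cases l with
  | nil => exact absurd rfl h
  | cons a t =>
    rw [PySem.List.max?_id_cons, PySem.List.max?_id_cons]
    simp only [Option.getD_some, List.foldl_cons]
    exact foldl_max_pull t a c

lemma scanMax_eq (rest : List String) :
    ∀ (mc c : Int) (p : String),
      scanMax mc c p rest = max mc ((PySem.List.max? (rlGo c p rest) (fun y => y)).getD 0) := by
  induction rest with
  | nil => intro mc c p; simp [scanMax, rlGo, PySem.List.max?_id_cons]
  | cons x xs ih =>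
    intro mc c p
    by_cases h : (x == p) = true
    · simp [scanMax, rlGo, h, ih]
    · simp only [scanMax, rlGo, h, if_neg, Bool.false_eq_true, not_false_eq_true]
      rw [ih, maxgd_cons c _ (rlGo_ne_nil 1 x xs), max_assoc]

lemma le_maxrun (rest : List String) :
    ∀ (c : Int) (p : String), c ≤ (PySem.List.max? (rlGo c p rest) (fun y => y)).getD 0 := by
  induction rest with
  | nil => intro c p; simp [rlGo, PySem.List.max?_id_cons]
  | cons x xs ih =>
    intro c p
    by_cases h : (x == p) = true
    · simp only [rlGo, h, if_true]
      have := ih (c + 1) x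
      omega
    · simp only [rlGo, h, Bool.false_eq_true, if_neg, not_false_eq_true]
      rw [maxgd_cons c _ (rlGo_ne_nil 1 x xs)]
      exact le_max_left _ _

lemma one_le_max_run (x : String) (xs : List String) : 1 ≤ max_run (x :: xs) := by
  rw [max_run_eq_rl]
  exact le_maxrun xs 1 x

lemma inner_eq (g : Int → String) (n : Int) :
    ∀ (k : Nat) (j0 mc c : Int), (n - j0).toNat = k →
      max (((PySem.List.pyRange j0 n 1).foldl
          (fun (s : Int × Int) j => if g j == g (j - 1) then (s.1, s.2 + 1) else (max s.1 s.2, 1))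
          (mc, c)).1)
        (((PySem.List.pyRange j0 n 1).foldl
          (fun (s : Int × Int) j => if g j == g (j - 1) then (s.1, s.2 + 1) else (max s.1 s.2, 1))
          (mc, c)).2)
        = scanMax mc c (g (j0 - 1)) ((PySem.List.pyRange j0 n 1).map g) := by
  intro k
  induction k with
  | zero =>
    intro j0 mc c hk
    rw [PySem.List.pyRange_one_eq_nil (by omega)]
    simp [scanMax]
  | succ k ih =>
    intro j0 mc c hk
    rw [PySem.List.pyRange_one_cons (by omega : j0 < n)]
    simp only [List.foldl_cons, List.map_cons]
    by_cases hx : (g j0 == g (j0 - 1)) = true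
    · rw [if_pos hx]
      have h2 := ih (j0 + 1) mc (c + 1) (by omega)
      rw [show j0 + 1 - 1 = j0 by ring] at h2
      simpa [scanMax, hx] using h2
    · rw [if_neg hx]
      have h2 := ih (j0 + 1) (max mc c) 1 (by omega)
      rw [show j0 + 1 - 1 = j0 by ring] at h2
      simpa [scanMax, hx] using h2

lemma line_eq (g : Int → String) (n mc : Int) (hn : 0 < n) :
    max (((PySem.List.pyRange 1 n 1).foldl
        (fun (s : Int × Int) j => if g j == g (j - 1) then (s.1, s.2 + 1) else (max s.1 s.2, 1))
        (mc, 1)).1)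
      (((PySem.List.pyRange 1 n 1).foldl
        (fun (s : Int × Int) j => if g j == g (j - 1) then (s.1, s.2 + 1) else (max s.1 s.2, 1))
        (mc, 1)).2)
      = max mc (max_run ((PySem.List.pyRange 0 n 1).map g)) := by
  have h := inner_eq g n (n - 1).toNat 1 mc 1 rfl
  rw [show (1 : Int) - 1 = 0 by ring] at h
  rw [h]
  rw [PySem.List.pyRange_one_cons hn, List.map_cons]
  rw [max_run_eq_rl]
  exact scanMax_eq _ mc 1 (g 0)

lemma pass_eq (g2 : Int → Int → String) (n init : Int) (hn : 0 < n) :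
    (PySem.List.pyRange 0 n 1).foldl
      (fun mc i => max (((PySem.List.pyRange 1 n 1).foldl
          (fun (s : Int × Int) j => if g2 i j == g2 i (j - 1) then (s.1, s.2 + 1) else (max s.1 s.2, 1))
          (mc, 1)).1)
        (((PySem.List.pyRange 1 n 1).foldl
          (fun (s : Int × Int) j => if g2 i j == g2 i (j - 1) then (s.1, s.2 + 1) else (max s.1 s.2, 1))
          (mc, 1)).2)) init
      = ((PySem.List.pyRange 0 n 1).map (fun i => (PySem.List.pyRange 0 n 1).map (g2 i))).foldl
          (fun mc l => max mc (max_run l)) init := by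
  rw [List.foldl_map]
  apply PySem.List.foldl_congr_mem
  intro mc i _
  exact line_eq (g2 i) n mc hn

lemma foldmax_eq (vals : List Int) (h : ∀ v ∈ vals, (1 : Int) ≤ v) :
    vals.foldl (fun mc v => max mc v) 0 = (PySem.List.max? vals (fun y => y)).getD 0 := by
  cases vals with
  | nil => simp [PySem.List.max?]
  | cons a t =>
    rw [PySem.List.max?_id_cons]
    simp only [Option.getD_some, List.foldl_cons]
    have ha : max 0 a = a := by
      have := h a (by simp)
      omega
    rw [ha]

-- ===== VERDICT (by name: the statement is the Claim_ definition above) =====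
theorem count_max_candies_in_board_spec : Claim_equal_count_max_candies_in_board := by
  unfold Claim_equal_count_max_candies_in_board
  intro board _ _
  unfold Spec_count_max_candies_in_board
  unfold count_max_candies_in_board count_max_candies_in_board_alt
  simp only [PySem.List.len_eq]
  by_cases hb : board = []
  · subst hb
    simp [PySem.List.pyRange_one_eq_nil, PySem.List.maxD, PySem.List.max?]
  · have hn : (0 : Int) < (board.length : Int) := by
      have : board.length ≠ 0 := fun h => hb (List.eq_nil_of_length_eq_zero h)
      omega
    rw [pass_eq (fun i j => PySem.List.pyGetD (PySem.List.pyGetD board i []) j "") (board.length : Int) 0 hn]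
    rw [pass_eq (fun j i => PySem.List.pyGetD (PySem.List.pyGetD board i []) j "") (board.length : Int) _ hn]
    rw [← List.foldl_append]
    rw [← List.foldl_map (f := max_run) (g := fun mc v => max mc v)]
    rw [PySem.List.maxD]
    apply foldmax_eq
    intro v hv
    obtain ⟨l, hl, rfl⟩ := List.mem_map.mp hv
    have hlne : l ≠ [] := by
      have hcons := PySem.List.pyRange_one_cons hn
      rcases List.mem_append.mp hl with hl | hl <;>
        (obtain ⟨i, hi, rfl⟩ := List.mem_map.mp hl; simp [hcons])
    obtain ⟨x, xs, rfl⟩ := List.exists_cons_of_ne_nil hlne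
    exact one_le_max_run x xs
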